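-- pv_equiv track=rewrite | github.com/VioleauPierre/Scrap_public_strava_data | functions_strava.py | interval_loop
-- ===== SOURCE A (Python) =====
-- def interval_loop(start,end):
--
--     #Separating year and week
--     year, week = divmod(start, 100)
--
--     interval = [start]
--
--     while start < end:
--         week += 1
--         if week > 52:
--             year += 1
--             week = 1
--         start = year * 100 + week
--         if start <= end:
--             interval.append(start)
--
--     return interval
-- ===== SOURCE B (Python) =====
-- def interval_loop(start, end):
--     interval = [start]
--     sy = start // 100
--     ey = end // 100
--     for y in range(sy, ey + 1):
--         for w in range(1, 53):
--             c = y * 100 + w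
--             if start < c <= end:
--                 interval.append(c)
--     return interval
-- ===== Notes on version B (the rewrite author's own statement) =====
-- stated objective: alternative
-- what changed: Replaced A's single advancing week counter with explicit 52-wraparound state by a nested scan over the year/week grid (years start//100..end//100, weeks 1..52) that appends every code c with start < c <= end.
import Mathlib
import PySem

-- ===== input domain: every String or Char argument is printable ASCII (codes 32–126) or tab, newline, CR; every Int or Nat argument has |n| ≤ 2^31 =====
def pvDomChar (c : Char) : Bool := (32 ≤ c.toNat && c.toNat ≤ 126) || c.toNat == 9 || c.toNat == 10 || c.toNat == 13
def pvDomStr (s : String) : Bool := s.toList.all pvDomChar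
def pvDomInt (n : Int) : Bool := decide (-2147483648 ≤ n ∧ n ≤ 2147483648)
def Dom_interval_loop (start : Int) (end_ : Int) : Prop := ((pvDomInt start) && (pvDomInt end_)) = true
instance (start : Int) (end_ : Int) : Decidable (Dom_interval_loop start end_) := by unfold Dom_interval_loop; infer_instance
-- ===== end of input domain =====

-- B replaces A's single week counter with wraparound by a nested year/week grid scan
-- appending every code start < y*100+w <= end (objective: alternative decomposition, same cost).

-- ===== PORT A =====
-- Python's divmod(start, 100) yields week = start % 100 with 0 <= week <= 99; the loop
-- invariant 'start = year*100 + week' (exact by the divmod identity) lets the loop carry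
-- (year, week) and test 'year*100 + week < end'.  This bound is cited for termination.
theorem pvWeekBounds (a : Int) :
    0 ≤ PySem.Int.mod a 100 ∧ PySem.Int.mod a 100 ≤ 99 := by
  have h1 := PySem.Int.mod_nonneg a (b := 100) (by norm_num)
  have h2 := PySem.Int.mod_lt a (b := 100) (by norm_num)
  omega

def pvLoopA (year week end_ : Int) (acc : List Int) (hw : 0 ≤ week ∧ week ≤ 99) : List Int :=
  if _h : year * 100 + week < end_ then
    if _hb : week + 1 > 52 then
      pvLoopA (year + 1) 1 end_
        (if (year + 1) * 100 + 1 ≤ end_ then acc ++ [(year + 1) * 100 + 1] else acc)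
        ⟨by omega, by omega⟩
    else
      pvLoopA year (week + 1) end_
        (if year * 100 + (week + 1) ≤ end_ then acc ++ [year * 100 + (week + 1)] else acc)
        ⟨by omega, by omega⟩
  else acc
termination_by (end_ - (year * 100 + week)).toNat
decreasing_by all_goals omega

def interval_loop (start : Int) (end_ : Int) : List Int :=
  pvLoopA (PySem.Int.floordiv start 100) (PySem.Int.mod start 100) end_ [start]
    (pvWeekBounds start)

-- ===== PORT B =====
def interval_loop_alt (start : Int) (end_ : Int) : List Int :=
  let sy := PySem.Int.floordiv start 100
  let ey := PySem.Int.floordiv end_ 100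
  (PySem.List.pyRange sy (ey + 1) 1).foldl
    (fun acc y =>
      (PySem.List.pyRange 1 53 1).foldl
        (fun acc2 w =>
          let c := y * 100 + w
          if start < c ∧ c ≤ end_ then acc2 ++ [c] else acc2)
        acc)
    [start]

-- ===== PRECONDITION & SPEC =====
def Spec_interval_loop (start : Int) (end_ : Int) (out : List Int) : Prop := out = interval_loop_alt start end_
instance (start : Int) (end_ : Int) (out : List Int) : Decidable (Spec_interval_loop start end_ out) := by unfold Spec_interval_loop; infer_instance

-- ===== CLAIM (what is proved, stated in full; the proofs are below) =====
def Claim_equal_interval_loop : Prop := ∀ (start : Int) (end_ : Int), Dom_interval_loop start end_ → Spec_interval_loop start end_ (interval_loop start end_)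

-- ===== LEMMAS AND PROOFS =====

-- a "week code": last two digits between 1 and 52
def pvOk (c : Int) : Prop := 1 ≤ c % 100 ∧ c % 100 ≤ 52

theorem pvLoopA_append (e : Int) : ∀ (n : Nat) (y w : Int) (hw : 0 ≤ w ∧ w ≤ 99),
    (e - (y * 100 + w)).toNat = n →
    ∀ acc, pvLoopA y w e acc hw = acc ++ pvLoopA y w e [] hw := by
  intro n
  induction n using Nat.strong_induction_on with
  | _ n ih =>
    intro y w hw hn acc
    conv_lhs => rw [pvLoopA]
    conv_rhs => rw [pvLoopA]
    split_ifs with h hb hle hle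
    · rw [ih ((e - ((y+1) * 100 + 1)).toNat) (by omega) (y+1) 1 ⟨by omega, by omega⟩ rfl,
          ih ((e - ((y+1) * 100 + 1)).toNat) (by omega) (y+1) 1 ⟨by omega, by omega⟩ rfl ([] ++ _)]
      simp
    · exact ih ((e - ((y+1) * 100 + 1)).toNat) (by omega) (y+1) 1 ⟨by omega, by omega⟩ rfl acc
    · rw [ih ((e - (y * 100 + (w+1))).toNat) (by omega) y (w+1) ⟨by omega, by omega⟩ rfl,
          ih ((e - (y * 100 + (w+1))).toNat) (by omega) y (w+1) ⟨by omega, by omega⟩ rfl ([] ++ _)]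
      simp
    · exact ih ((e - (y * 100 + (w+1))).toNat) (by omega) y (w+1) ⟨by omega, by omega⟩ rfl acc
    · simp

theorem pvLoopA_mem (e : Int) : ∀ (n : Nat) (y w : Int) (hw : 0 ≤ w ∧ w ≤ 99),
    (e - (y * 100 + w)).toNat = n →
    ∀ c, c ∈ pvLoopA y w e [] hw ↔ (y * 100 + w < c ∧ c ≤ e ∧ pvOk c) := by
  intro n
  induction n using Nat.strong_induction_on with
  | _ n ih =>
    intro y w hw hn c
    rw [pvLoopA]
    split_ifs with h hb hle hle
    all_goals try rw [pvLoopA_append e _ _ _ ⟨by omega, by omega⟩ rfl]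
    · rw [List.mem_append,
        ih ((e - ((y+1) * 100 + 1)).toNat) (by omega) (y+1) 1 ⟨by omega, by omega⟩ rfl c]
      simp only [List.nil_append, List.mem_singleton, pvOk]
      omega
    · rw [List.nil_append,
        ih ((e - ((y+1) * 100 + 1)).toNat) (by omega) (y+1) 1 ⟨by omega, by omega⟩ rfl c]
      simp only [pvOk]
      omega
    · rw [List.mem_append,
        ih ((e - (y * 100 + (w+1))).toNat) (by omega) y (w+1) ⟨by omega, by omega⟩ rfl c]
      simp only [List.nil_append, List.mem_singleton, pvOk]
      omega
    · rw [List.nil_append,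
        ih ((e - (y * 100 + (w+1))).toNat) (by omega) y (w+1) ⟨by omega, by omega⟩ rfl c]
      simp only [pvOk]
      omega
    · simp only [List.not_mem_nil, false_iff, pvOk]
      omega

theorem pvLoopA_pairwise (e : Int) : ∀ (n : Nat) (y w : Int) (hw : 0 ≤ w ∧ w ≤ 99),
    (e - (y * 100 + w)).toNat = n →
    (pvLoopA y w e [] hw).Pairwise (· < ·) := by
  intro n
  induction n using Nat.strong_induction_on with
  | _ n ih =>
    intro y w hw hn
    rw [pvLoopA]
    split_ifs with h hb hle hle
    all_goals try rw [pvLoopA_append e _ _ _ ⟨by omega, by omega⟩ rfl]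
    · refine List.pairwise_append.2
        ⟨by simp, ih ((e - ((y+1) * 100 + 1)).toNat) (by omega) (y+1) 1 ⟨by omega, by omega⟩ rfl, ?_⟩
      intro a ha b hb'
      rw [pvLoopA_mem e ((e - ((y+1) * 100 + 1)).toNat) (y+1) 1 ⟨by omega, by omega⟩ rfl b] at hb'
      simp at ha
      omega
    · rw [List.nil_append]
      exact ih ((e - ((y+1) * 100 + 1)).toNat) (by omega) (y+1) 1 ⟨by omega, by omega⟩ rfl
    · refine List.pairwise_append.2
        ⟨by simp, ih ((e - (y * 100 + (w+1))).toNat) (by omega) y (w+1) ⟨by omega, by omega⟩ rfl, ?_⟩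
      intro a ha b hb'
      rw [pvLoopA_mem e ((e - (y * 100 + (w+1))).toNat) y (w+1) ⟨by omega, by omega⟩ rfl b] at hb'
      simp at ha
      omega
    · rw [List.nil_append]
      exact ih ((e - (y * 100 + (w+1))).toNat) (by omega) y (w+1) ⟨by omega, by omega⟩ rfl
    · simp

-- B's tail after the loop-shape rewrites
def pvBlock (start e y : Int) : List Int :=
  ((PySem.List.pyRange 1 53 1).filter
    (fun w => decide (start < y * 100 + w ∧ y * 100 + w ≤ e))).map (fun w => y * 100 + w)

theorem pvFoldl_append_ite (start e y : Int) : ∀ (l : List Int) (acc : List Int),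
    l.foldl (fun acc2 w =>
      if start < y * 100 + w ∧ y * 100 + w ≤ e then acc2 ++ [y * 100 + w] else acc2) acc
    = acc ++ (l.filter (fun w => decide (start < y * 100 + w ∧ y * 100 + w ≤ e))).map
        (fun w => y * 100 + w) := by
  intro l
  induction l with
  | nil => simp
  | cons a l ihl =>
    intro acc
    simp only [List.foldl_cons, List.filter_cons]
    by_cases hp : start < y * 100 + a ∧ y * 100 + a ≤ e
    · simp [hp, ihl]
    · simp [hp, ihl]

theorem pvAlt_eq (start e : Int) :
    interval_loop_alt start e =
      [start] ++ (PySem.List.pyRange (PySem.Int.floordiv start 100)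
        (PySem.Int.floordiv e 100 + 1) 1).flatMap (pvBlock start e) := by
  unfold interval_loop_alt
  rw [show (fun acc y =>
      (PySem.List.pyRange 1 53 1).foldl
        (fun acc2 w =>
          let c := y * 100 + w
          if start < c ∧ c ≤ e then acc2 ++ [c] else acc2) acc)
    = (fun (acc : List Int) (y : Int) => acc ++ pvBlock start e y) from
      funext fun acc => funext fun y => pvFoldl_append_ite start e y _ acc]
  exact PySem.List.foldl_append_eq_flatMap (pvBlock start e) _ [start]

theorem pvBlock_mem (start e y c : Int) :
    c ∈ pvBlock start e y ↔
      ∃ w, 1 ≤ w ∧ w ≤ 52 ∧ start < y * 100 + w ∧ y * 100 + w ≤ e ∧ c = y * 100 + w := by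
  unfold pvBlock
  simp only [List.mem_map, List.mem_filter, PySem.List.mem_pyRange_one, decide_eq_true_eq]
  constructor
  · rintro ⟨w, ⟨⟨h1, h2⟩, h3, h4⟩, h5⟩; exact ⟨w, by omega, by omega, h3, h4, h5.symm⟩
  · rintro ⟨w, h1, h2, h3, h4, h5⟩; exact ⟨w, ⟨⟨by omega, by omega⟩, h3, h4⟩, h5.symm⟩

theorem pvBtail_mem (start e c : Int)
    (hs : 0 < (100:Int)) :
    (c ∈ (PySem.List.pyRange (PySem.Int.floordiv start 100)
        (PySem.Int.floordiv e 100 + 1) 1).flatMap (pvBlock start e)) ↔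
      (start < c ∧ c ≤ e ∧ pvOk c) := by
  rw [PySem.Int.floordiv_eq_ediv_of_pos (a := start) hs, PySem.Int.floordiv_eq_ediv_of_pos (a := e) hs]
  simp only [List.mem_flatMap, PySem.List.mem_pyRange_one, pvBlock_mem]
  constructor
  · rintro ⟨y, ⟨hy1, hy2⟩, w, h1, h2, h3, h4, h5⟩
    subst h5
    refine ⟨h3, h4, ?_, ?_⟩ <;> omega
  · rintro ⟨h1, h2, h3, h4⟩
    refine ⟨c / 100, ⟨?_, ?_⟩, c % 100, by omega, by omega, by omega, by omega, by omega⟩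
    · omega
    · omega

theorem pvBtail_pairwise (start e : Int) : ∀ (l : List Int), l.Pairwise (· < ·) →
    (l.flatMap (pvBlock start e)).Pairwise (· < ·) := by
  intro l
  induction l with
  | nil => simp
  | cons y l ihl =>
    intro hp
    rw [List.flatMap_cons]
    rcases List.pairwise_cons.1 hp with ⟨hy, hl⟩
    refine List.pairwise_append.2 ⟨?_, ihl hl, ?_⟩
    · -- one block is strictly increasing in w
      unfold pvBlock
      refine List.Pairwise.map _ (fun a b hab => by omega) ?_
      exact List.Pairwise.filter _
        ((PySem.List.pairwise_lt_pyRange_one 1 53).imp (by intro a b h; omega))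
    · intro a ha b hb
      rcases List.mem_flatMap.1 hb with ⟨y', hy', hb'⟩
      rcases (pvBlock_mem start e y a).1 ha with ⟨w, hw1, hw2, _, _, rfl⟩
      rcases (pvBlock_mem start e y' b).1 hb' with ⟨w', hw1', hw2', _, _, rfl⟩
      have := hy y' hy'
      omega

-- strictly increasing integer lists with the same members are equal
theorem pvSortedExt : ∀ (l1 l2 : List Int), l1.Pairwise (· < ·) → l2.Pairwise (· < ·) →
    (∀ c, c ∈ l1 ↔ c ∈ l2) → l1 = l2 := by
  intro l1
  induction l1 with
  | nil =>
    intro l2 _ _ hm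
    cases l2 with
    | nil => rfl
    | cons b t => exact absurd ((hm b).2 (by simp)) (by simp)
  | cons a t1 ih =>
    intro l2 h1 h2 hm
    cases l2 with
    | nil => exact absurd ((hm a).1 (by simp)) (by simp)
    | cons b t2 =>
      rcases List.pairwise_cons.1 h1 with ⟨ha, ht1⟩
      rcases List.pairwise_cons.1 h2 with ⟨hb, ht2⟩
      have hab : a = b := by
        rcases List.mem_cons.1 ((hm a).1 (by simp)) with h | h
        · exact h
        · rcases List.mem_cons.1 ((hm b).2 (by simp)) with h' | h'
          · exact h'.symm
          · have := ha b h'; have := hb a h; omega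
      subst hab
      have : t1 = t2 := by
        refine ih t2 ht1 ht2 fun c => ⟨fun hc => ?_, fun hc => ?_⟩
        · rcases List.mem_cons.1 ((hm c).1 (List.mem_cons_of_mem _ hc)) with h | h
          · exact absurd hc (by subst h; intro hcc; exact absurd (ha _ hcc) (by omega))
          · exact h
        · rcases List.mem_cons.1 ((hm c).2 (List.mem_cons_of_mem _ hc)) with h | h
          · exact absurd hc (by subst h; intro hcc; exact absurd (hb _ hcc) (by omega))
          · exact h
      rw [this]

-- ===== VERDICT (by name: the statement is the Claim_ definition above) =====
theorem interval_loop_spec : Claim_equal_interval_loop := by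
  intro start e _
  unfold Spec_interval_loop
  have hid : PySem.Int.floordiv start 100 * 100 + PySem.Int.mod start 100 = start :=
    PySem.Int.floordiv_mul_add_mod start 100
  rw [pvAlt_eq start e]
  unfold interval_loop
  rw [pvLoopA_append e _ _ _ (pvWeekBounds start) rfl]
  refine congrArg ([start] ++ ·) ?_
  refine pvSortedExt _ _ (pvLoopA_pairwise e _ _ _ (pvWeekBounds start) rfl)
    (pvBtail_pairwise start e _ (PySem.List.pairwise_lt_pyRange_one _ _)) fun c => ?_
  rw [pvLoopA_mem e _ _ _ (pvWeekBounds start) rfl c, pvBtail_mem start e c (by norm_num), hid]
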